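-- pv_equiv track=rewrite | github.com/banana-galaxy/challenges | challenge20(T-primes)/solutions/Xcepter.py | solution
-- ===== SOURCE A (Python) =====
-- def solution(num):
--     count = 0
--     for i in range(1, num + 1):
--         if 25 % i == 0:
--             count += 1
--
--     if count == 3:
--         return True
--     else:
--         return False
-- ===== SOURCE B (Python) =====
-- def solution(num):
--     # 25 has exactly three positive divisors (1, 5, 25), all <= 25,
--     # so the count reaches 3 exactly when num >= 25.
--     return num >= 25
-- ===== Notes on version B (the rewrite author's own statement) =====
-- stated objective: faster
-- what changed: Replaced the O(num) divisor-counting loop by the closed-form test num >= 25, since 25 has exactly three divisors, all at most 25.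
import Mathlib
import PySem

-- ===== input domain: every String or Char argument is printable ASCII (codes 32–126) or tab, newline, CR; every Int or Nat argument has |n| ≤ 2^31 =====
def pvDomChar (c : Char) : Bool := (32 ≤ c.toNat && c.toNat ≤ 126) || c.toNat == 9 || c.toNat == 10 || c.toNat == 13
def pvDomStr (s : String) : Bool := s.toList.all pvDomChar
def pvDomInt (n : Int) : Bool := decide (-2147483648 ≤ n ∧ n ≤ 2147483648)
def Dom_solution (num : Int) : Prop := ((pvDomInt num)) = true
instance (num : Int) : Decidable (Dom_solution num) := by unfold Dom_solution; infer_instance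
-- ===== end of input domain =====

-- B replaces the O(num) divisor-counting loop by the closed-form test num >= 25 (faster).

-- ===== PORT A =====
def solution (num : Int) : Bool :=
  let count : Int :=
    (PySem.List.pyRange 1 (num + 1) 1).foldl
      (fun c i => if PySem.Int.mod 25 i = 0 then c + 1 else c) 0
  if count = 3 then true else false

-- ===== PORT B =====
def solution_alt (num : Int) : Bool := decide (25 ≤ num)

-- ===== PRECONDITION & SPEC =====
def Spec_solution (num : Int) (out : Bool) : Prop := out = solution_alt num
instance (num : Int) (out : Bool) : Decidable (Spec_solution num out) := by unfold Spec_solution; infer_instance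

-- ===== CLAIM (what is proved, stated in full; the proofs are below) =====
def Claim_equal_solution : Prop := ∀ (num : Int), Dom_solution num → Spec_solution num (solution num)

-- ===== LEMMAS AND PROOFS =====

theorem pv_foldl_count (l : List Int) (c : Int) :
    l.foldl (fun c i => if PySem.Int.mod 25 i = 0 then c + 1 else c) c
      = c + (l.countP (fun i => decide (PySem.Int.mod 25 i = 0)) : Int) := by
  induction l generalizing c with
  | nil => simp
  | cons x xs ih =>
    simp only [List.foldl_cons, List.countP_cons, ih]
    by_cases h : PySem.Int.mod 25 x = 0 <;> simp [h] <;> ring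

theorem pv_count_tail_zero (num : Int) (h : 25 ≤ num) :
    (PySem.List.pyRange 26 (num + 1) 1).countP (fun i => decide (PySem.Int.mod 25 i = 0)) = 0 := by
  rw [List.countP_eq_zero]
  intro i hi
  rw [PySem.List.mem_pyRange_one] at hi
  simp only [decide_eq_true_eq]
  rw [PySem.Int.mod_eq_zero_iff_dvd]
  intro hdvd
  have := Int.le_of_dvd (by norm_num) hdvd
  omega

theorem pv_count_head :
    (PySem.List.pyRange 1 26 1).countP (fun i => decide (PySem.Int.mod 25 i = 0)) = 3 := by
  decide

theorem solution_eq (num : Int) : solution num = solution_alt num := by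
  unfold solution solution_alt
  rw [pv_foldl_count]
  by_cases h25 : 25 ≤ num
  · rw [PySem.List.pyRange_one_append 1 26 (num + 1) (by omega) (by omega),
      List.countP_append, pv_count_tail_zero num h25, pv_count_head]
    simp [h25]
  · by_cases h0 : num ≤ 0
    · rw [PySem.List.pyRange_one_eq_nil (by omega)]
      simp [h25]
    · interval_cases num <;> decide

-- ===== VERDICT (by name: the statement is the Claim_ definition above) =====
theorem solution_spec : Claim_equal_solution := by
  intro num _
  unfold Spec_solution
  exact solution_eq num
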